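-- pv_equiv track=rewrite | github.com/kenzo786/info-clinical-reasoning | archive/legacy-scripts/categorize_ukmla_illness_scripts.py | assign_tables_to_headings
-- ===== SOURCE A (Python) =====
-- from typing import Dict, Iterable, List, Set, Tuple
--
-- def assign_tables_to_headings(headings: List[str], table_count: int) -> List[str]:
--     if not headings:
--         return []
--     if len(headings) == 1:
--         return [headings[0]] * table_count
--     if len(headings) == table_count:
--         return headings
--     # Fall back to sequential assignment; any extra tables use final heading.
--     return [headings[min(i, len(headings) - 1)] for i in range(table_count)]
-- ===== SOURCE B (Python) =====
-- from typing import List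
--
-- def assign_tables_to_headings(headings: List[str], table_count: int) -> List[str]:
--     if not headings or table_count <= 0:
--         return []
--     if table_count <= len(headings):
--         return headings[:table_count]
--     return list(headings) + [headings[-1]] * (table_count - len(headings))
-- ===== Notes on version B (the rewrite author's own statement) =====
-- stated objective: simpler
-- what changed: Replaces the element-wise min-indexed comprehension (and the redundant len==1 / len==table_count branches) with a slice when table_count <= len(headings) and an append of a replicated last heading otherwise.
import Mathlib
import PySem

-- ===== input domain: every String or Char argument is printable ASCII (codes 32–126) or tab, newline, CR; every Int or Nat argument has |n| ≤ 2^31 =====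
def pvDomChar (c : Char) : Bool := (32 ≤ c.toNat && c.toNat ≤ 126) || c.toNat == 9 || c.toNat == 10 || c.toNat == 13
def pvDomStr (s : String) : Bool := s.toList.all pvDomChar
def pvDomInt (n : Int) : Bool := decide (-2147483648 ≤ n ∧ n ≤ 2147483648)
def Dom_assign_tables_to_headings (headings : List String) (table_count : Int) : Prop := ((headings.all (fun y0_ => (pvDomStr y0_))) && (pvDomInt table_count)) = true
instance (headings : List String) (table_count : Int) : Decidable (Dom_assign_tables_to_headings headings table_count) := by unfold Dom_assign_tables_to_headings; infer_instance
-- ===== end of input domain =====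

-- B replaces A's element-wise min-indexed comprehension (and the redundant len==1 / len==table_count
-- branches) with a slice when enough headings exist and an append of a replicated last heading otherwise
-- (objective: simpler). Equivalence is proved on all inputs; both functions are total.

-- ===== PORT A =====
-- headings[0] and headings[min i (len-1)] are always in range (headings nonempty, 0 ≤ i), so the
-- pyGetD default "" never fires; the port is exact.
def assign_tables_to_headings (headings : List String) (table_count : Int) : List String :=
  if headings = [] then []
  else if headings.length = 1 then
    PySem.List.pyRepeat [PySem.List.pyGetD headings 0 ""] table_count
  else if (headings.length : Int) = table_count then headings
  else
    (PySem.List.pyRange 0 table_count 1).map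
      (fun i => PySem.List.pyGetD headings (min i ((headings.length : Int) - 1)) "")

-- ===== PORT B =====
-- headings[-1] is always in range here (headings nonempty), so the pyGetD default "" never fires.
def assign_tables_to_headings_alt (headings : List String) (table_count : Int) : List String :=
  if headings = [] ∨ table_count ≤ 0 then []
  else if table_count ≤ (headings.length : Int) then
    PySem.List.slice headings none (some table_count)
  else
    headings ++ PySem.List.pyRepeat [PySem.List.pyGetD headings (-1) ""]
      (table_count - (headings.length : Int))

-- ===== PRECONDITION & SPEC =====
def Spec_assign_tables_to_headings (headings : List String) (table_count : Int) (out : List String) : Prop := out = assign_tables_to_headings_alt headings table_count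
instance (headings : List String) (table_count : Int) (out : List String) : Decidable (Spec_assign_tables_to_headings headings table_count out) := by unfold Spec_assign_tables_to_headings; infer_instance

-- ===== CLAIM (what is proved, stated in full; the proofs are below) =====
def Claim_equal_assign_tables_to_headings : Prop := ∀ (headings : List String) (table_count : Int), Dom_assign_tables_to_headings headings table_count → Spec_assign_tables_to_headings headings table_count (assign_tables_to_headings headings table_count)

-- ===== LEMMAS AND PROOFS =====

-- A's general comprehension, over a Nat range, equals B's take-or-pad shape.
theorem pvCore (headings : List String) (h : headings ≠ []) (n : Nat) :
    (List.range n).map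
      (fun k : Nat => PySem.List.pyGetD headings (min (k : Int) ((headings.length : Int) - 1)) "") =
    if n ≤ headings.length then headings.take n
    else headings ++ List.replicate (n - headings.length) (headings.getLast h) := by
  have hlen : 0 < headings.length := List.length_pos_of_ne_nil h
  apply List.ext_getElem
  · simp only [List.length_map, List.length_range]
    split_ifs with hle
    · simp [Nat.min_eq_left hle]
    · simp only [List.length_append, List.length_replicate]; omega
  · intro i hi1 hi2
    simp only [List.length_map, List.length_range] at hi1
    have hmin : min (i : Int) ((headings.length : Int) - 1)
        = ((min i (headings.length - 1) : Nat) : Int) := by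
      push_cast; omega
    simp only [List.getElem_map, List.getElem_range, hmin, PySem.List.pyGetD_natCast]
    split_ifs with hle
    · have hil : i < headings.length := lt_of_lt_of_le hi1 hle
      have hm : min i (headings.length - 1) = i := by omega
      rw [hm, List.getElem_take]
      exact List.getD_eq_getElem _ _ hil
    · by_cases hil : i < headings.length
      · have hm : min i (headings.length - 1) = i := by omega
        rw [hm, List.getElem_append_left hil]
        exact List.getD_eq_getElem _ _ hil
      · have hm : min i (headings.length - 1) = headings.length - 1 := by omega
        rw [hm, List.getElem_append_right (by omega)]
        simp only [List.getElem_replicate]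
        rw [List.getLast_eq_getElem]
        exact List.getD_eq_getElem _ _ (by omega)

-- ===== VERDICT (by name: the statement is the Claim_ definition above) =====
theorem assign_tables_to_headings_spec : Claim_equal_assign_tables_to_headings := by
  intro headings table_count _
  unfold Spec_assign_tables_to_headings assign_tables_to_headings assign_tables_to_headings_alt
  by_cases hnil : headings = []
  · simp [hnil]
  · have hlen : 0 < headings.length := List.length_pos_of_ne_nil hnil
    by_cases hpos : table_count ≤ 0
    · have hne : (headings.length : Int) ≠ table_count := by omega
      simp [hnil, hne, hpos, PySem.List.pyRepeat_singleton, Int.toNat_of_nonpos hpos,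
        PySem.List.pyRange_one_eq_nil hpos]
    · rw [if_neg (by simp [hnil])]
      have hn1 : 1 ≤ table_count.toNat := by omega
      have htc : table_count = ((table_count.toNat : Nat) : Int) := by omega
      have hB :
          (if table_count ≤ (headings.length : Int) then
            PySem.List.slice headings none (some table_count)
          else
            headings ++ PySem.List.pyRepeat [PySem.List.pyGetD headings (-1) ""]
              (table_count - (headings.length : Int))) =
          (if table_count.toNat ≤ headings.length then headings.take table_count.toNat
           else headings ++ List.replicate (table_count.toNat - headings.length)
             (headings.getLast hnil)) := by
        rw [PySem.List.pyGetD_neg_one headings "" hnil, PySem.List.pyRepeat_singleton,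
          PySem.List.slice_to headings (by omega : (0:Int) ≤ table_count)]
        split_ifs with h1 h2 h2
        · rfl
        · omega
        · omega
        · congr 1
          congr 1
          omega
      rw [hB, if_neg (by simp [hnil, hpos] : ¬(headings = [] ∨ table_count ≤ 0))]
      by_cases hone : headings.length = 1
      · rw [if_pos hone]
        obtain ⟨a, ha⟩ := List.length_eq_one_iff.mp hone
        subst ha
        rw [PySem.List.pyRepeat_singleton]
        simp only [PySem.List.pyGetD_zero_cons, List.getLast_singleton, List.length_cons,
          List.length_nil]
        split_ifs with h1
        · have : table_count.toNat = 1 := by omega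
          simp [this]
        · have hrep : table_count.toNat = (table_count.toNat - 1) + 1 := by omega
          rw [hrep, List.replicate_succ]
          simp
      · rw [if_neg hone]
        by_cases heq : (headings.length : Int) = table_count
        · rw [if_pos heq]
          have : table_count.toNat = headings.length := by omega
          simp [this]
        · rw [if_neg heq]
          rw [htc, PySem.List.pyRange_zero_natCast, List.map_map]
          exact pvCore headings hnil table_count.toNat
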